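-- pv_equiv track=rewrite | github.com/pekoto/python-data-structures | problems/dynamic_longest_common_substr.py | _longest_repeating_subseq
-- ===== SOURCE A (Python) =====
-- def _longest_repeating_subseq(s: str, index_1: int, index_2: int) -> int:
--     """Recursive helper function."""
--     if index_1 >= len(s) or index_2 >= len(s):
--         return 0
--
--     if index_1 != index_2 and s[index_1] == s[index_2]:
--         return 1 + _longest_repeating_subseq(s, index_1+1, index_2+1)
--
--     skip_index_1 = _longest_repeating_subseq(s, index_1+1, index_2)
--     skip_index_2 = _longest_repeating_subseq(s, index_1, index_2+1)
--
--     return max(skip_index_1, skip_index_2)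
-- ===== SOURCE B (Python) =====
-- def _longest_repeating_subseq(s: str, index_1: int, index_2: int) -> int:
--     """Bottom-up DP over suffix index pairs (row by row) instead of exponential recursion."""
--     n = len(s)
--     if index_1 >= n or index_2 >= n:
--         return 0
--     row = [0] * (n + 1)          # dp values for i = n
--     for i in range(n - 1, index_1 - 1, -1):
--         new = [0] * (n + 1)
--         for j in range(n - 1, -1, -1):
--             if i != j and s[i] == s[j]:
--                 new[j] = 1 + row[j + 1]
--             else:
--                 new[j] = max(row[j], new[j + 1])
--         row = new
--     return row[index_2]
-- ===== Notes on version B (the rewrite author's own statement) =====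
-- stated objective: alternative
-- what changed: Replaced the exponential three-way recursion with a bottom-up dynamic-programming grid over (index_1, index_2) computed row by row with O(n) extra space; intended as faster (O(n^2) vs exponential; a timing run measured B 94x at n=16 and A timed out beyond, so the check could not confirm a ratio at the largest size).
-- outside the precondition, e.g. on _longest_repeating_subseq('cccbc', -3, -3): A returns 5, B returns 2
import Mathlib
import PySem

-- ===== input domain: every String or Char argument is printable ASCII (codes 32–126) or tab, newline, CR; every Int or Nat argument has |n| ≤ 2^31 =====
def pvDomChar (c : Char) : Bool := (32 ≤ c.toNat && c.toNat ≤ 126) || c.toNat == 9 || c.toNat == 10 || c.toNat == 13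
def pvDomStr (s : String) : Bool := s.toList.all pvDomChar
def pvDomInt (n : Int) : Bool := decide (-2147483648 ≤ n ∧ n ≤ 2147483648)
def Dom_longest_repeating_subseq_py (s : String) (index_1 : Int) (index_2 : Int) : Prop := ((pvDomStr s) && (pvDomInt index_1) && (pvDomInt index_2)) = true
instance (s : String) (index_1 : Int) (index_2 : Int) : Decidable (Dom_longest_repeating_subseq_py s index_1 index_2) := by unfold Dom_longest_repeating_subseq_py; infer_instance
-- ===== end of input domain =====

-- B replaces A's exponential recursion with a bottom-up DP grid computed row by row; intended as faster (a timing run measured B 94x at n=16 and A timed out beyond, so no ratio at the largest size was confirmed).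

-- ===== PORT A =====
-- Literal port of the recursion. Python evaluates `s[index_1] == s[index_2]` only
-- after `index_1 != index_2`; on a negative index below -len(s) Python raises
-- IndexError (PySem.Str.pyGet? = none there) — such inputs are outside Pre_, and the
-- `.isSome` conjunct merely keeps the port total.
def longest_repeating_subseq_py (s : String) (index_1 : Int) (index_2 : Int) : Int :=
  if index_1 ≥ PySem.Str.len s ∨ index_2 ≥ PySem.Str.len s then 0
  else if index_1 ≠ index_2 ∧ (PySem.Str.pyGet? s index_1).isSome ∧
          PySem.Str.pyGet? s index_1 = PySem.Str.pyGet? s index_2 then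
    1 + longest_repeating_subseq_py s (index_1 + 1) (index_2 + 1)
  else
    max (longest_repeating_subseq_py s (index_1 + 1) index_2)
        (longest_repeating_subseq_py s index_1 (index_2 + 1))
termination_by ((PySem.Str.len s - index_1).toNat + (PySem.Str.len s - index_2).toNat)
decreasing_by all_goals (simp only [PySem.Str.len_eq] at *; omega)

-- ===== PORT B =====
-- one inner loop of Source B: compute row i of the DP grid from row i+1
def pvAltRow (cs : List Char) (n : Int) (i : Int) (row : List Int) : List Int :=
  (PySem.List.pyRange (n - 1) (-1) (-1)).foldl
    (fun new j =>
      let v : Int :=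
        if i ≠ j ∧ PySem.List.pyGetD cs i ' ' = PySem.List.pyGetD cs j ' ' then
          1 + PySem.List.pyGetD row (j + 1) 0
        else
          max (PySem.List.pyGetD row j 0) (PySem.List.pyGetD new (j + 1) 0)
      PySem.List.pySetD new j v)
    (List.replicate (n.toNat + 1) 0)

def longest_repeating_subseq_py_alt (s : String) (index_1 : Int) (index_2 : Int) : Int :=
  let cs := s.toList
  let n : Int := PySem.Str.len s
  if index_1 ≥ n ∨ index_2 ≥ n then 0
  else
    let row := (PySem.List.pyRange (n - 1) (index_1 - 1) (-1)).foldl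
      (fun row i => pvAltRow cs n i row) (List.replicate (n.toNat + 1) 0)
    PySem.List.pyGetD row index_2 0

-- ===== PRECONDITION & SPEC =====
-- Pre_ admits nonnegative indices (the helper's intended domain; its caller starts it at
-- (0,0)) and any call with an index past the end (both programs return 0 at once there).
-- It excludes calls in which both indices are below len(s) and one is negative: there A's
-- value comes from Python's negative-index wraparound, and below -len(s) A raises IndexError.
def Pre_longest_repeating_subseq_py (s : String) (index_1 : Int) (index_2 : Int) : Prop :=
  (0 ≤ index_1 ∧ 0 ≤ index_2) ∨ PySem.Str.len s ≤ index_1 ∨ PySem.Str.len s ≤ index_2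
instance (s : String) (index_1 : Int) (index_2 : Int) : Decidable (Pre_longest_repeating_subseq_py s index_1 index_2) := by unfold Pre_longest_repeating_subseq_py; infer_instance

def pvWitness_longest_repeating_subseq_py : String × Int × Int := ("aabxa", 0, 0)

def Spec_longest_repeating_subseq_py (s : String) (index_1 : Int) (index_2 : Int) (out : Int) : Prop := out = longest_repeating_subseq_py_alt s index_1 index_2
instance (s : String) (index_1 : Int) (index_2 : Int) (out : Int) : Decidable (Spec_longest_repeating_subseq_py s index_1 index_2 out) := by unfold Spec_longest_repeating_subseq_py; infer_instance

-- ===== CLAIM (what is proved, stated in full; the proofs are below) =====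
def Claim_equal_longest_repeating_subseq_py : Prop := ∀ (s : String) (index_1 : Int) (index_2 : Int), Dom_longest_repeating_subseq_py s index_1 index_2 → Pre_longest_repeating_subseq_py s index_1 index_2 → Spec_longest_repeating_subseq_py s index_1 index_2 (longest_repeating_subseq_py s index_1 index_2)



-- ===== LEMMAS AND PROOFS =====

-- the DP target: row i of the grid, i.e. A's values at (i, 0..len)
def pvTgt (s : String) (i : Int) : List Int :=
  (List.range (s.toList.length + 1)).map (fun k : Nat => longest_repeating_subseq_py s i (k : Int))

lemma pv_len_tgt (s : String) (i : Int) : (pvTgt s i).length = s.toList.length + 1 := by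
  simp [pvTgt]

lemma pvA_zero (s : String) (i j : Int) (h : i ≥ (s.toList.length : Int) ∨ j ≥ (s.toList.length : Int)) :
    longest_repeating_subseq_py s i j = 0 := by
  rw [longest_repeating_subseq_py.eq_def]
  simp only [PySem.Str.len_eq]
  rw [if_pos h]

lemma pvTgt_getElem (s : String) (i : Int) (k : Nat) (hk : k < s.toList.length + 1) :
    (pvTgt s i)[k]'(by rw [pv_len_tgt]; omega) =
      longest_repeating_subseq_py s i ((k : Nat) : Int) := by
  have hq : (pvTgt s i)[k]? = some (longest_repeating_subseq_py s i ((k : Nat) : Int)) := by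
    show ((List.range (s.toList.length + 1)).map
      (fun k : Nat => longest_repeating_subseq_py s i (k : Int)))[k]? = _
    rw [List.getElem?_map, List.getElem?_range hk]
    rfl
  rw [List.getElem?_eq_getElem (by rw [pv_len_tgt]; omega)] at hq
  exact Option.some.inj hq

lemma pvTgt_getD (s : String) (i x : Int) (h0 : 0 ≤ x) (h1 : x ≤ (s.toList.length : Int)) :
    PySem.List.pyGetD (pvTgt s i) x 0 = longest_repeating_subseq_py s i x := by
  rw [PySem.List.pyGetD_eq_getElem (pvTgt s i) 0 h0 (by rw [pv_len_tgt]; omega)]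
  rw [pvTgt_getElem s i x.toNat (by omega)]
  congr 1
  omega

lemma pvA_unfold_mid (s : String) (i j : Int)
    (hi0 : 0 ≤ i) (hi1 : i < (s.toList.length : Int))
    (hj0 : 0 ≤ j) (hj1 : j < (s.toList.length : Int)) :
    longest_repeating_subseq_py s i j =
      if i ≠ j ∧ PySem.List.pyGetD s.toList i ' ' = PySem.List.pyGetD s.toList j ' ' then
        1 + longest_repeating_subseq_py s (i + 1) (j + 1)
      else
        max (longest_repeating_subseq_py s (i + 1) j) (longest_repeating_subseq_py s i (j + 1)) := by
  conv_lhs => rw [longest_repeating_subseq_py.eq_def]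
  simp only [PySem.Str.len_eq]
  rw [if_neg (by omega)]
  have hgi : PySem.Str.pyGet? s i = some s.toList[i.toNat] := by
    conv_lhs => rw [show i = ((i.toNat : Nat) : Int) from (Int.toNat_of_nonneg hi0).symm]
    rw [PySem.Str.pyGet?_natCast]
    exact List.getElem?_eq_getElem (by omega)
  have hgj : PySem.Str.pyGet? s j = some s.toList[j.toNat] := by
    conv_lhs => rw [show j = ((j.toNat : Nat) : Int) from (Int.toNat_of_nonneg hj0).symm]
    rw [PySem.Str.pyGet?_natCast]
    exact List.getElem?_eq_getElem (by omega)
  rw [PySem.List.pyGetD_eq_getElem s.toList ' ' hi0 (by omega),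
      PySem.List.pyGetD_eq_getElem s.toList ' ' hj0 (by omega), hgi, hgj]
  simp

-- the inner fold of pvAltRow, started at a, fills positions ≤ a with row i of the grid
lemma pv_inner_inv (s : String) (i : Int) (hi0 : 0 ≤ i) (hi1 : i < (s.toList.length : Int)) :
    ∀ (m : Nat) (a : Int), (a + 1).toNat = m → a ≤ (s.toList.length : Int) - 1 →
    ∀ acc : List Int, acc.length = s.toList.length + 1 →
    (∀ k : Int, 0 ≤ k → k ≤ (s.toList.length : Int) →
      PySem.List.pyGetD acc k 0 =
        if a < k then longest_repeating_subseq_py s i k else 0) →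
    ∀ res, res = (PySem.List.pyRange a (-1) (-1)).foldl
      (fun new j =>
        let v : Int :=
          if i ≠ j ∧ PySem.List.pyGetD s.toList i ' ' = PySem.List.pyGetD s.toList j ' ' then
            1 + PySem.List.pyGetD (pvTgt s (i + 1)) (j + 1) 0
          else
            max (PySem.List.pyGetD (pvTgt s (i + 1)) j 0) (PySem.List.pyGetD new (j + 1) 0)
        PySem.List.pySetD new j v) acc →
    res.length = s.toList.length + 1 ∧
    (∀ k : Int, 0 ≤ k → k ≤ (s.toList.length : Int) →
      PySem.List.pyGetD res k 0 = longest_repeating_subseq_py s i k) := by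
  intro m
  induction m using Nat.strong_induction_on with
  | _ m IH =>
    intro a hm ha acc hlen hacc res hres
    by_cases hneg : a ≤ -1
    · rw [PySem.List.pyRange_neg_one_eq_nil (by omega)] at hres
      simp only [List.foldl_nil] at hres
      subst hres
      refine ⟨hlen, fun k hk0 hk1 => ?_⟩
      rw [hacc k hk0 hk1, if_pos (by omega)]
    · push_neg at hneg
      have ha0 : 0 ≤ a := by omega
      rw [PySem.List.pyRange_neg_one_cons (by omega), List.foldl_cons] at hres
      set v : Int :=
        if i ≠ a ∧ PySem.List.pyGetD s.toList i ' ' = PySem.List.pyGetD s.toList a ' ' then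
          1 + PySem.List.pyGetD (pvTgt s (i + 1)) (a + 1) 0
        else
          max (PySem.List.pyGetD (pvTgt s (i + 1)) a 0) (PySem.List.pyGetD acc (a + 1) 0)
        with hv
      have hacc1 : PySem.List.pyGetD acc (a + 1) 0 = longest_repeating_subseq_py s i (a + 1) := by
        rw [hacc (a + 1) (by omega) (by omega), if_pos (by omega)]
      have hva : v = longest_repeating_subseq_py s i a := by
        rw [hv, pvTgt_getD s (i+1) (a+1) (by omega) (by omega),
            pvTgt_getD s (i+1) a (by omega) (by omega), hacc1]
        exact (pvA_unfold_mid s i a hi0 hi1 ha0 (by omega)).symm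
      refine IH a.toNat (by omega) (a - 1) (by omega) (by omega)
        (PySem.List.pySetD acc a v) (by rw [PySem.List.length_pySetD]; exact hlen)
        ?_ res hres
      intro k hk0 hk1
      rw [PySem.List.pySetD_of_nonneg acc v ha0,
          PySem.List.pyGetD_eq_getElem _ 0 hk0 (by simp only [List.length_set, hlen]; omega)]
      rw [List.getElem_set]
      by_cases hka : a.toNat = k.toNat
      · rw [if_pos hka, hva]
        have : k = a := by omega
        subst this
        rw [if_pos (by omega)]
      · rw [if_neg hka]
        have : acc[k.toNat] = PySem.List.pyGetD acc k 0 :=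
          (PySem.List.pyGetD_eq_getElem acc 0 hk0 (by omega)).symm
        rw [this, hacc k hk0 hk1]
        by_cases hlt : a < k
        · rw [if_pos hlt, if_pos (by omega)]
        · rw [if_neg hlt, if_neg (by omega)]

lemma pv_altRow_tgt (s : String) (i : Int) (hi0 : 0 ≤ i) (hi1 : i < (s.toList.length : Int)) :
    pvAltRow s.toList ((s.toList.length : Int)) i (pvTgt s (i + 1)) = pvTgt s i := by
  have h := pv_inner_inv s i hi0 hi1 ((((s.toList.length : Int)) - 1 + 1).toNat)
    ((s.toList.length : Int) - 1) rfl (by omega)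
    (List.replicate (s.toList.length + 1) 0) (by simp)
    (fun k hk0 hk1 => by
      rw [PySem.List.pyGetD_eq_getElem _ 0 hk0 (by simp only [List.length_replicate]; omega), List.getElem_replicate]
      by_cases hk : (s.toList.length : Int) - 1 < k
      · rw [if_pos hk, pvA_zero s i k (Or.inr (by omega))]
      · rw [if_neg hk])
    (pvAltRow s.toList ((s.toList.length : Int)) i (pvTgt s (i + 1)))
    (by simp only [pvAltRow, Int.toNat_natCast])
  refine List.ext_getElem (by rw [h.1, pv_len_tgt]) (fun k hk1 hk2 => ?_)
  have hk : k ≤ s.toList.length := by rw [h.1] at hk1; omega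
  have h1 := h.2 (k : Int) (by omega) (by omega)
  rw [PySem.List.pyGetD_eq_getElem _ 0 (by omega) (by rw [h.1]; push_cast; omega)] at h1
  simp only [Int.toNat_natCast] at h1
  rw [h1, pvTgt_getElem s i k (by omega)]

lemma pv_outer_inv (s : String) (i1 : Int) (h1 : 0 ≤ i1) :
    ∀ (m : Nat) (a : Int), (a - (i1 - 1)).toNat = m → i1 - 1 ≤ a → a ≤ (s.toList.length : Int) - 1 →
    (PySem.List.pyRange a (i1 - 1) (-1)).foldl
      (fun row i => pvAltRow s.toList ((s.toList.length : Int)) i row) (pvTgt s (a + 1)) = pvTgt s i1 := by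
  intro m
  induction m using Nat.strong_induction_on with
  | _ m IH =>
    intro a hm ha1 ha2
    by_cases hbase : a ≤ i1 - 1
    · rw [PySem.List.pyRange_neg_one_eq_nil (by omega), List.foldl_nil]
      congr 1
      omega
    · rw [PySem.List.pyRange_neg_one_cons (by omega), List.foldl_cons,
          pv_altRow_tgt s a (by omega) (by omega)]
      have : pvTgt s a = pvTgt s ((a - 1) + 1) := by congr 1; omega
      rw [this]
      exact IH (a - 1 - (i1 - 1)).toNat (by omega) (a - 1) rfl (by omega) (by omega)

lemma pv_tgt_top (s : String) :
    pvTgt s (s.toList.length : Int) = List.replicate (s.toList.length + 1) 0 := by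
  refine List.eq_replicate_iff.mpr ⟨pv_len_tgt s _, fun b hb => ?_⟩
  simp only [pvTgt, List.mem_map] at hb
  obtain ⟨k, _, hk⟩ := hb
  rw [← hk, pvA_zero s _ _ (Or.inl (by omega))]

-- ===== VERDICT (by name: the statement is the Claim_ definition above) =====
theorem longest_repeating_subseq_py_spec : Claim_equal_longest_repeating_subseq_py := by
  intro s i1 i2 _ hpre
  unfold Pre_longest_repeating_subseq_py at hpre
  simp only [PySem.Str.len_eq] at hpre
  unfold Spec_longest_repeating_subseq_py
  simp only [longest_repeating_subseq_py_alt, PySem.Str.len_eq]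
  by_cases hg : i1 ≥ (s.toList.length : Int) ∨ i2 ≥ (s.toList.length : Int)
  · rw [if_pos hg, pvA_zero s i1 i2 (by omega)]
  · rw [if_neg hg]
    push_neg at hg
    have h1 : 0 ≤ i1 := by rcases hpre with ⟨h, _⟩ | h | h <;> omega
    have h2 : 0 ≤ i2 := by rcases hpre with ⟨_, h⟩ | h | h <;> omega
    have hrep : List.replicate (((s.toList.length : Int)).toNat + 1) (0 : Int)
        = pvTgt s (((s.toList.length : Int) - 1) + 1) := by
      rw [Int.toNat_natCast, sub_add_cancel, pv_tgt_top s]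
    rw [hrep,
        pv_outer_inv s i1 h1 ((s.toList.length : Int) - 1 - (i1 - 1)).toNat
          ((s.toList.length : Int) - 1) rfl (by omega) (by omega),
        pvTgt_getD s i1 i2 h2 (by omega)]
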